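-- pv_equiv track=rewrite | github.com/rgoncales/CPS707 | utils/parser.py | appendSpaces
-- ===== SOURCE A (Python) =====
-- def appendSpaces(str: str, length:int, rightAlign: bool) -> str:
--     spaces = length - len(str)
--     if rightAlign:
--         for i in range(0, spaces):
--             str = '0' + str
--     else:
--         for i in range(0, spaces):
--             str += ' '
--     return str
-- ===== SOURCE B (Python) =====
-- def appendSpaces(str: str, length: int, rightAlign: bool) -> str:
--     # Build the output character-by-position in one pass over the output
--     # indices, instead of repeatedly concatenating onto the input string.
--     n = len(str)
--     total = n if n > length else length
--     if rightAlign: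
--         pad = total - n
--         return ''.join('0' if i < pad else str[i - pad] for i in range(total))
--     return ''.join(str[i] if i < n else ' ' for i in range(total))
-- ===== Notes on version B (the rewrite author's own statement) =====
-- stated objective: alternative
-- what changed: B constructs each output character by its position in a single pass over the output indices (generator over range(total) joined once), instead of A's repeated string concatenation that grows the string one character per loop iteration.
import Mathlib
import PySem

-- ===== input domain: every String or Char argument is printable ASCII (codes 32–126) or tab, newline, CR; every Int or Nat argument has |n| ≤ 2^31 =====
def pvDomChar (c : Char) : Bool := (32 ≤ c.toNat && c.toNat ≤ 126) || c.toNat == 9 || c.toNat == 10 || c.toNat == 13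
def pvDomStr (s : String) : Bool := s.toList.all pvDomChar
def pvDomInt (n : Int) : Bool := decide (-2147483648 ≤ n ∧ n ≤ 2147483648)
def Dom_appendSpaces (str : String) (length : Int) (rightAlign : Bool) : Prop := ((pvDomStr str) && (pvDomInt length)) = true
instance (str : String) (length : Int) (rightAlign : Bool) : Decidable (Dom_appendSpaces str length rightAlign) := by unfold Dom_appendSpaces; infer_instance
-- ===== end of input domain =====

-- B builds the result character-by-position in one pass over the output indices, instead of A's
-- repeated one-character concatenations (alternative decomposition; return values proved equal).

-- ===== PORT A =====
-- Literal port: spaces = length - len(str); a loop prepending '0' (rightAlign) or appending ' '.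
def appendSpaces (str : String) (length : Int) (rightAlign : Bool) : String :=
  let spaces := length - PySem.Str.len str
  if rightAlign then
    String.ofList ((PySem.List.pyRange 0 spaces 1).foldl (fun s _ => '0' :: s) str.toList)
  else
    String.ofList ((PySem.List.pyRange 0 spaces 1).foldl (fun s _ => s ++ [' ']) str.toList)

-- ===== PORT B =====
-- Port of Source B: total = max(len, length); each output position i is computed directly
-- ('0' below pad / str[i-pad], resp. str[i] / ' ' past the end) and the characters are joined once.
-- pyGetD's default ' ' only makes the in-range Python indexing total; it is never hit.
def appendSpaces_alt (str : String) (length : Int) (rightAlign : Bool) : String :=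
  let cs := str.toList
  let n := PySem.Str.len str
  let total := if n > length then n else length
  if rightAlign then
    let pad := total - n
    String.ofList ((PySem.List.pyRange 0 total 1).map
      (fun i => if i < pad then '0' else PySem.List.pyGetD cs (i - pad) ' '))
  else
    String.ofList ((PySem.List.pyRange 0 total 1).map
      (fun i => if i < n then PySem.List.pyGetD cs i ' ' else ' '))

-- ===== PRECONDITION & SPEC =====
def Spec_appendSpaces (str : String) (length : Int) (rightAlign : Bool) (out : String) : Prop := out = appendSpaces_alt str length rightAlign
instance (str : String) (length : Int) (rightAlign : Bool) (out : String) : Decidable (Spec_appendSpaces str length rightAlign out) := by unfold Spec_appendSpaces; infer_instance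

-- ===== CLAIM (what is proved, stated in full; the proofs are below) =====
def Claim_equal_appendSpaces : Prop := ∀ (str : String) (length : Int) (rightAlign : Bool), Dom_appendSpaces str length rightAlign → Spec_appendSpaces str length rightAlign (appendSpaces str length rightAlign)

-- ===== LEMMAS AND PROOFS =====

-- A's prepend loop over any index list builds replicate (len l) '0' in front.
theorem foldl_cons_zero (l : List Int) (s : List Char) :
    l.foldl (fun s _ => '0' :: s) s = List.replicate l.length '0' ++ s := by
  induction l generalizing s with
  | nil => rfl
  | cons x xs ih => simp [List.foldl_cons, ih, List.replicate_succ', List.append_assoc]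

-- A's append loop over any index list appends replicate (len l) ' '.
theorem foldl_append_space (l : List Int) (s : List Char) :
    l.foldl (fun s _ => s ++ [' ']) s = s ++ List.replicate l.length ' ' := by
  induction l generalizing s with
  | nil => simp
  | cons x xs ih => simp [List.foldl_cons, ih, List.replicate_succ, List.append_assoc]

-- Reading every position of cs back by its index reproduces cs.
theorem map_range_getD (cs : List Char) :
    (List.range cs.length).map (fun k : Nat => PySem.List.pyGetD cs (k : Int) ' ') = cs := by
  apply List.ext_getElem
  · simp
  · intro i h1 h2
    simp [List.getElem?_eq_getElem h2]

-- B's per-position map for the right-aligned branch is p zeros followed by the string.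
theorem mapB_zero (cs : List Char) (p : Nat) :
    (PySem.List.pyRange 0 ((p : Int) + cs.length) 1).map
      (fun i => if i < (p : Int) then '0' else PySem.List.pyGetD cs (i - p) ' ')
      = List.replicate p '0' ++ cs := by
  rw [PySem.List.pyRange_one_append 0 (p : Int) ((p : Int) + cs.length) (by positivity) (by omega),
    List.map_append]
  congr 1
  · rw [List.eq_replicate_iff]
    refine ⟨by simp [PySem.List.length_pyRange_one], ?_⟩
    intro b hb
    obtain ⟨i, hi, rfl⟩ := List.mem_map.mp hb
    rw [PySem.List.mem_pyRange_one] at hi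
    simp [hi.2]
  · rw [PySem.List.pyRange_one]
    have h1 : ((p : Int) + cs.length - p).toNat = cs.length := by omega
    rw [h1, List.map_map]
    have h2 : ∀ k ∈ List.range cs.length,
        ((fun i => if i < (p : Int) then '0' else PySem.List.pyGetD cs (i - p) ' ') ∘
          (fun k : Nat => (p : Int) + k)) k = PySem.List.pyGetD cs (k : Int) ' ' := by
      intro k hk
      simp only [Function.comp]
      rw [if_neg (by omega)]
      congr 1
      omega
    rw [List.map_congr_left h2, map_range_getD]

-- B's per-position map for the left-aligned branch is the string followed by p spaces.
theorem mapB_space (cs : List Char) (p : Nat) :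
    (PySem.List.pyRange 0 ((cs.length : Int) + p) 1).map
      (fun i => if i < (cs.length : Int) then PySem.List.pyGetD cs i ' ' else ' ')
      = cs ++ List.replicate p ' ' := by
  rw [PySem.List.pyRange_one_append 0 (cs.length : Int) ((cs.length : Int) + p) (by positivity) (by omega),
    List.map_append]
  congr 1
  · have h2 : ∀ i ∈ PySem.List.pyRange 0 (cs.length : Int) 1,
        (if i < (cs.length : Int) then PySem.List.pyGetD cs i ' ' else ' ')
          = PySem.List.pyGetD cs i ' ' := by
      intro i hi
      rw [PySem.List.mem_pyRange_one] at hi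
      rw [if_pos hi.2]
    rw [List.map_congr_left h2]
    exact PySem.List.map_pyGetD_pyRange_zero (xs := cs) (d := ' ')
  · rw [List.eq_replicate_iff]
    refine ⟨by simp [PySem.List.length_pyRange_one], ?_⟩
    intro b hb
    obtain ⟨i, hi, rfl⟩ := List.mem_map.mp hb
    rw [PySem.List.mem_pyRange_one] at hi
    rw [if_neg (by omega)]

-- Both ports, written over List Char: they agree for every list, length and alignment.
theorem lists_agree (cs : List Char) (length : Int) (rightAlign : Bool) :
    (if rightAlign then
        (PySem.List.pyRange 0 (length - cs.length) 1).foldl (fun s _ => '0' :: s) cs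
      else
        (PySem.List.pyRange 0 (length - cs.length) 1).foldl (fun s _ => s ++ [' ']) cs)
    = (let n : Int := cs.length
       let total := if n > length then n else length
       if rightAlign then
        (PySem.List.pyRange 0 total 1).map
          (fun i => if i < total - n then '0' else PySem.List.pyGetD cs (i - (total - n)) ' ')
       else
        (PySem.List.pyRange 0 total 1).map
          (fun i => if i < n then PySem.List.pyGetD cs i ' ' else ' ')) := by
  set p : Nat := (length - cs.length).toNat with hp
  have hlenA : (PySem.List.pyRange 0 (length - cs.length) 1).length = p := by
    rw [PySem.List.length_pyRange_one]; omega
  by_cases h : (cs.length : Int) > length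
  · -- no padding needed: p = 0, total = cs.length
    have hp0 : p = 0 := by omega
    have htot : (if (cs.length : Int) > length then (cs.length : Int) else length)
        = (cs.length : Int) := if_pos h
    cases rightAlign
    · simp only [if_false, Bool.false_eq_true, htot]
      rw [foldl_append_space, hlenA, hp0]
      have := mapB_space cs 0
      simpa using this.symm
    · simp only [if_true, htot]
      rw [foldl_cons_zero, hlenA, hp0]
      have := mapB_zero cs 0
      simp only [Nat.cast_zero, zero_add, List.replicate_zero, List.nil_append] at this
      rw [sub_self]
      exact this.symm
  · -- padding of p = length - len(cs) characters: total = length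
    have htot : (if (cs.length : Int) > length then (cs.length : Int) else length) = length :=
      if_neg h
    have hlen : length = (cs.length : Int) + p := by omega
    cases rightAlign
    · simp only [if_false, Bool.false_eq_true, htot]
      rw [foldl_append_space, hlenA]
      rw [hlen, mapB_space cs p]
    · simp only [if_true, htot]
      rw [foldl_cons_zero, hlenA]
      have hpad : length - (cs.length : Int) = (p : Int) := by omega
      have hlen' : length = (p : Int) + cs.length := by omega
      rw [hpad, hlen', mapB_zero cs p]

-- ===== VERDICT (by name: the statement is the Claim_ definition above) =====
theorem appendSpaces_spec : Claim_equal_appendSpaces := by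
  intro str length rightAlign _
  unfold Spec_appendSpaces appendSpaces appendSpaces_alt
  simp only [PySem.Str.len_eq]
  have h := congrArg String.ofList (lists_agree str.toList length rightAlign)
  cases rightAlign <;> simpa using h
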